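-- pv_equiv track=rewrite | github.com/Yoon-sabujag/cbc7119 | cha-bio-safety-watchdog/parse_menu.py | transpose_to_menus
-- ===== SOURCE A (Python) =====
-- def transpose_to_menus(dates, sections):
--     menus = []
--     for day_idx, date in enumerate(dates):
--         la, lb, dn = [], [], []
--
--         for row in sections.get('lunch_a', []):
--             if day_idx < len(row):
--                 la.append(row[day_idx])
--
--         if day_idx < 5:
--             for row in sections.get('lunch_b', []):
--                 if day_idx < len(row):
--                     lb.append(row[day_idx])
--             for row in sections.get('dinner', []):
--                 if day_idx < len(row):
--                     dn.append(row[day_idx])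
--
--         menus.append({
--             'date': date,
--             'lunch_a': '\n'.join(la) if la else None,
--             'lunch_b': '\n'.join(lb) if lb else None,
--             'dinner':  '\n'.join(dn) if dn else None,
--         })
--     return menus
-- ===== SOURCE B (Python) =====
-- def transpose_to_menus(dates, sections):
--     n = len(dates)
--     caps = {'lunch_a': n, 'lunch_b': min(n, 5), 'dinner': min(n, 5)}
--     cols = {key: [[] for _ in range(n)] for key in caps}
--     # single distributing pass: each row's cells go straight into their day's bucket
--     for key, cap in caps.items():
--         bucket = cols[key]
--         for row in sections.get(key, []):
--             for idx in range(min(len(row), cap)):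
--                 bucket[idx].append(row[idx])
--
--     def cell(col):
--         return '\n'.join(col) if col else None
--
--     return [{'date': d,
--              'lunch_a': cell(cols['lunch_a'][i]),
--              'lunch_b': cell(cols['lunch_b'][i]),
--              'dinner': cell(cols['dinner'][i])}
--             for i, d in enumerate(dates)]
-- ===== Notes on version B (the rewrite author's own statement) =====
-- stated objective: alternative
-- what changed: A re-scans every section's rows once per day; B makes a single distributing pass over each section's rows, appending each cell into a per-day bucket list, and then assembles the menus from the buckets in a separate pass.
import Mathlib
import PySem

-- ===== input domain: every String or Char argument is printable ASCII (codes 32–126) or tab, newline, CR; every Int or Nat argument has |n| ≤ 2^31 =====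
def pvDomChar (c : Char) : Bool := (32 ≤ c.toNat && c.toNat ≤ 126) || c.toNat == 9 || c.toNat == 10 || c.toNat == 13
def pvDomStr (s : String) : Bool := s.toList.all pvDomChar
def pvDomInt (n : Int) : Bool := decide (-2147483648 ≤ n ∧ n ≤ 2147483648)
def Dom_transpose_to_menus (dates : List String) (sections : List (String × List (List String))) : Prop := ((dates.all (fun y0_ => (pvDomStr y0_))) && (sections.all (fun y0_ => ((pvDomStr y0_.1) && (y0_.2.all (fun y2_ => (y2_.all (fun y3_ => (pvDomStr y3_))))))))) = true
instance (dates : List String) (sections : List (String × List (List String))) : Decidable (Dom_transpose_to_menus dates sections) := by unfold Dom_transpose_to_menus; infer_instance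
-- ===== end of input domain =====

-- B replaces A's per-day re-scan of every section's rows by one distributing pass into
-- per-day buckets followed by an assembly pass (objective: alternative decomposition).

-- ===== PORT A =====
-- sections.get(key, []): first-match lookup in the association list (dict convention)
def pvSectGet (sections : List (String × List (List String))) (key : String) : List (List String) :=
  ((sections.find? (fun p => p.1 == key)).map (fun p => p.2)).getD []

def transpose_to_menus (dates : List String) (sections : List (String × List (List String))) : List (List (String × Option String)) :=
  (PySem.List.enumerate dates).foldl (fun menus p =>
    let la := (pvSectGet sections "lunch_a").foldl
      (fun acc row => if p.1 < (row.length : Int) then acc ++ [PySem.List.pyGetD row p.1 ""] else acc) []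
    let lb := if p.1 < 5 then
        (pvSectGet sections "lunch_b").foldl
          (fun acc row => if p.1 < (row.length : Int) then acc ++ [PySem.List.pyGetD row p.1 ""] else acc) []
      else []
    let dn := if p.1 < 5 then
        (pvSectGet sections "dinner").foldl
          (fun acc row => if p.1 < (row.length : Int) then acc ++ [PySem.List.pyGetD row p.1 ""] else acc) []
      else []
    menus ++ [[("date", some p.2),
               ("lunch_a", if la ≠ [] then some (PySem.Str.join "\n" la) else none),
               ("lunch_b", if lb ≠ [] then some (PySem.Str.join "\n" lb) else none),
               ("dinner",  if dn ≠ [] then some (PySem.Str.join "\n" dn) else none)]]) []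

-- ===== PORT B =====
-- 'for idx in range(min(len(row), cap)): bucket[idx].append(row[idx])' expressed as a
-- structural walk over the bucket list carrying the index (exact: only in-range idx append)
def pvDistribRow (row : List String) (cap : Nat) : Nat → List (List String) → List (List String)
  | _, [] => []
  | idx, b :: bs =>
      (if idx < min row.length cap then b ++ [row.getD idx ""] else b) :: pvDistribRow row cap (idx + 1) bs

def pvDistribute (rows : List (List String)) (cap : Nat) (cols : List (List String)) : List (List String) :=
  rows.foldl (fun cs row => pvDistribRow row cap 0 cs) cols

def pvCell (col : List String) : Option String :=
  if col ≠ [] then some (PySem.Str.join "\n" col) else none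

def transpose_to_menus_alt (dates : List String) (sections : List (String × List (List String))) : List (List (String × Option String)) :=
  let n := dates.length
  let la := pvDistribute (pvSectGet sections "lunch_a") n (List.replicate n [])
  let lb := pvDistribute (pvSectGet sections "lunch_b") (min n 5) (List.replicate n [])
  let dn := pvDistribute (pvSectGet sections "dinner") (min n 5) (List.replicate n [])
  (PySem.List.enumerate dates).map (fun p =>
    [("date", some p.2),
     ("lunch_a", pvCell (PySem.List.pyGetD la p.1 [])),
     ("lunch_b", pvCell (PySem.List.pyGetD lb p.1 [])),
     ("dinner",  pvCell (PySem.List.pyGetD dn p.1 []))])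

-- ===== PRECONDITION & SPEC =====
def Spec_transpose_to_menus (dates : List String) (sections : List (String × List (List String))) (out : List (List (String × Option String))) : Prop := out = transpose_to_menus_alt dates sections
instance (dates : List String) (sections : List (String × List (List String))) (out : List (List (String × Option String))) : Decidable (Spec_transpose_to_menus dates sections out) := by unfold Spec_transpose_to_menus; infer_instance

-- ===== CLAIM (what is proved, stated in full; the proofs are below) =====
def Claim_equal_transpose_to_menus : Prop := ∀ (dates : List String) (sections : List (String × List (List String))), Dom_transpose_to_menus dates sections → Spec_transpose_to_menus dates sections (transpose_to_menus dates sections)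

-- ===== LEMMAS AND PROOFS =====

theorem pvDistribRow_getElem? (row : List String) (cap : Nat) (bs : List (List String)) (idx i : Nat) :
    (pvDistribRow row cap idx bs)[i]? =
      bs[i]?.map (fun b => if idx + i < min row.length cap then b ++ [row.getD (idx + i) ""] else b) := by
  induction bs generalizing idx i with
  | nil => simp [pvDistribRow]
  | cons b bs ih =>
    cases i with
    | zero => simp [pvDistribRow]
    | succ j =>
      simp only [pvDistribRow, List.getElem?_cons_succ, ih]
      have : idx + (j + 1) = (idx + 1) + j := by omega
      rw [this]

theorem pvDistribute_getElem? (rows : List (List String)) (cap : Nat) (cols : List (List String)) (i : Nat) :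
    (pvDistribute rows cap cols)[i]? =
      cols[i]?.map (fun b => rows.foldl
        (fun acc row => if i < min row.length cap then acc ++ [row.getD i ""] else acc) b) := by
  induction rows generalizing cols with
  | nil => cases h : cols[i]? <;> simp [pvDistribute, h]
  | cons r rs ih =>
    show (pvDistribute rs cap (pvDistribRow r cap 0 cols))[i]? = _
    rw [ih, pvDistribRow_getElem?]
    cases cols[i]? <;> simp

theorem pvFoldl_congr {α β : Type} (f g : β → α → β) (l : List α) (b : β)
    (h : ∀ acc x, f acc x = g acc x) : l.foldl f b = l.foldl g b := by
  induction l generalizing b with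
  | nil => rfl
  | cons x xs ih => simp only [List.foldl_cons, h, ih]

theorem pvFoldl_const {α β : Type} (f : β → α → β) (l : List α) (b : β)
    (h : ∀ acc x, f acc x = acc) : l.foldl f b = b := by
  induction l generalizing b with
  | nil => rfl
  | cons x xs ih => simp [List.foldl_cons, h, ih]

-- A's per-day column = B's bucket i, for i < n (number of dates), cap either n or min n 5
theorem pvBucket_eq (rows : List (List String)) (n i : Nat) (hi : i < n) :
    PySem.List.pyGetD (pvDistribute rows n (List.replicate n [])) (i : Int) [] =
      rows.foldl (fun acc row => if (i : Int) < (row.length : Int) then acc ++ [PySem.List.pyGetD row (i : Int) ""] else acc) [] := by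
  rw [PySem.List.pyGetD_natCast]
  have h1 : (pvDistribute rows n (List.replicate n []))[i]? =
      some (rows.foldl (fun acc row => if i < min row.length n then acc ++ [row.getD i ""] else acc) []) := by
    rw [pvDistribute_getElem?]
    simp [hi]
  rw [List.getD_eq_getElem?_getD, h1]
  simp only [Option.getD_some]
  apply pvFoldl_congr
  intro acc row
  have : (i < min row.length n) = ((i : Int) < (row.length : Int)) := by
    simp only [eq_iff_iff, Int.ofNat_lt]
    omega
  rw [PySem.List.pyGetD_natCast]
  simp [this]

theorem pvBucket5_eq (rows : List (List String)) (n i : Nat) (hi : i < n) :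
    PySem.List.pyGetD (pvDistribute rows (min n 5) (List.replicate n [])) (i : Int) [] =
      (if (i : Int) < 5 then
        rows.foldl (fun acc row => if (i : Int) < (row.length : Int) then acc ++ [PySem.List.pyGetD row (i : Int) ""] else acc) []
      else []) := by
  rw [PySem.List.pyGetD_natCast]
  have h1 : (pvDistribute rows (min n 5) (List.replicate n []))[i]? =
      some (rows.foldl (fun acc row => if i < min row.length (min n 5) then acc ++ [row.getD i ""] else acc) []) := by
    rw [pvDistribute_getElem?]
    simp [hi]
  rw [List.getD_eq_getElem?_getD, h1]
  simp only [Option.getD_some]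
  by_cases h5 : i < 5
  · rw [if_pos (by exact_mod_cast h5)]
    apply pvFoldl_congr
    intro acc row
    have : (i < min row.length (min n 5)) = ((i : Int) < (row.length : Int)) := by
      simp only [eq_iff_iff, Int.ofNat_lt]
      omega
    rw [PySem.List.pyGetD_natCast]
    simp [this]
  · rw [if_neg (by exact_mod_cast h5)]
    apply pvFoldl_const
    intro acc row
    rw [if_neg (by omega)]

-- ===== VERDICT (by name: the statement is the Claim_ definition above) =====
theorem transpose_to_menus_spec : Claim_equal_transpose_to_menus := by
  intro dates sections _
  show transpose_to_menus dates sections = transpose_to_menus_alt dates sections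
  unfold transpose_to_menus transpose_to_menus_alt
  rw [PySem.List.foldl_append_singleton_eq_map]
  simp only [List.nil_append]
  apply List.map_congr_left
  intro p hp
  rcases (PySem.List.mem_enumerate_iff dates 0 p).1 hp with ⟨k, hk, rfl⟩
  simp only [zero_add]
  rw [pvBucket_eq _ dates.length k hk, pvBucket5_eq _ dates.length k hk, pvBucket5_eq _ dates.length k hk]
  by_cases h5 : (k : Int) < 5
  · simp only [if_pos h5, pvCell]
  · simp only [if_neg h5, pvCell]
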